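-- pv_equiv track=rewrite | github.com/idealclasses/SELF-HOST | blocklists/split_social_blocklist.py | split_domains
-- ===== SOURCE A (Python) =====
-- def split_domains(domains, patterns):
--     result = {name: set() for name in patterns.keys()}
--     others = set()
--     for d in domains:
--         matched = False
--         for name, pats in patterns.items():
--             for pat in pats:
--                 if d == pat or d.endswith("." + pat) or pat in d:
--                     result[name].add(d)
--                     matched = True
--                     break
--             if matched:
--                 break
--         if not matched:
--             others.add(d)
--     return result, others
-- ===== SOURCE B (Python) =====
-- def split_domains(domains, patterns):
--     # 'd == pat' and 'd.endswith("." + pat)' are both subsumed by 'pat in d',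
--     # so a domain's category is simply the first name whose pattern list has a
--     # substring of d.  Classify each domain once, then group by comprehensions.
--     def category(d):
--         return next((name for name, pats in patterns.items()
--                      if any(pat in d for pat in pats)), None)
--     cat = {d: category(d) for d in domains}
--     result = {name: {d for d in domains if cat[d] == name} for name in patterns}
--     others = {d for d in domains if cat[d] is None}
--     return result, others
-- ===== Notes on version B (the rewrite author's own statement) =====
-- stated objective: simpler
-- what changed: B drops the redundant 'd == pat' and 'd.endswith("."+pat)' tests (both are subsumed by 'pat in d'), classifies each domain once into a category map, and builds the result by per-category set comprehensions instead of A's triple-nested loop with a matched flag, break statements and in-place dict mutation.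
import Mathlib
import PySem

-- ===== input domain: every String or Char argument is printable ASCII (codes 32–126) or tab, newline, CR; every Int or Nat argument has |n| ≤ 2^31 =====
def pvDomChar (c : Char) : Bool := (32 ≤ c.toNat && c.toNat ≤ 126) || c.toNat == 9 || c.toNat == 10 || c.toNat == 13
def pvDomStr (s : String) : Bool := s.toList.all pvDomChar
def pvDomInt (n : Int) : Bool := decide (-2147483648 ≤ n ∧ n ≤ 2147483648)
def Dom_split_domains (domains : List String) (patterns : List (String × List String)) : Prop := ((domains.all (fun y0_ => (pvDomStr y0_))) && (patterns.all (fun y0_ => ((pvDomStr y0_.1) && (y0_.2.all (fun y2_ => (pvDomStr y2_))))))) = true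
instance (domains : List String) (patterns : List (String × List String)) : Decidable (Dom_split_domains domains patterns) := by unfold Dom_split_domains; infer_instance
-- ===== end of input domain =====

-- B replaces A's triple-nested loop (redundant ==/endswith/substring tests, matched
-- flag, breaks, in-place dict mutation) by a single classification function and
-- per-category comprehensions; same values, same cost class (objective: simpler).

-- ===== PORT A =====
-- 'd == pat or d.endswith("." + pat) or pat in d'
def condA (d pat : String) : Bool :=
  d == pat || PySem.Str.endswith d ("." ++ pat) || PySem.Str.isIn pat d

-- inner 'for pat in pats: if …: …; break' — true iff some pattern matched (the break)
def loopPatsA (d : String) : List String → Bool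
  | [] => false
  | pat :: rest => if condA d pat then true else loopPatsA d rest

-- middle 'for name, pats in patterns.items(): … if matched: break'
def loopNamesA (d : String) (result : PySem.Dict String (PySem.Set String)) :
    List (String × List String) → PySem.Dict String (PySem.Set String) × Bool
  | [] => (result, false)
  | p :: rest =>
      if loopPatsA d p.2 then
        (result.modify p.1 PySem.Set.empty (fun s => PySem.Set.add s d), true)
      else loopNamesA d result rest

def split_domains (domains : List String) (patterns : List (String × List String)) :
    (List (String × List String)) × List String :=
  let result0 : PySem.Dict String (PySem.Set String) :=
    patterns.foldl (fun r p => r.insert p.1 PySem.Set.empty) PySem.Dict.empty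
  let fin :=
    domains.foldl (fun st d =>
      match loopNamesA d st.1 patterns with
      | (r, matched) => if matched then (r, st.2) else (r, PySem.Set.add st.2 d))
      (result0, PySem.Set.empty)
  (fin.1.items, fin.2)

-- ===== PORT B =====
-- 'any(pat in d for pat in pats)'
def matchesB (d : String) (p : String × List String) : Bool :=
  p.2.any (fun pat => PySem.Str.isIn pat d)

-- 'next((name for name, pats in patterns.items() if any(pat in d for pat in pats)), None)'
def categoryB (patterns : List (String × List String)) (d : String) : Option String :=
  (patterns.find? (matchesB d)).map (·.1)

def split_domains_alt (domains : List String) (patterns : List (String × List String)) :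
    (List (String × List String)) × List String :=
  let cats : PySem.Dict String (Option String) :=
    PySem.Dict.ofList (domains.map (fun d => (d, categoryB patterns d)))
  let result : PySem.Dict String (PySem.Set String) :=
    PySem.Dict.ofList (patterns.map (fun p =>
      (p.1, PySem.Set.ofList (domains.filter (fun d => cats.getD d none == some p.1)))))
  let others : PySem.Set String :=
    PySem.Set.ofList (domains.filter (fun d => (cats.getD d none).isNone))
  (result.items, others)

-- ===== PRECONDITION & SPEC =====
def Spec_split_domains (domains : List String) (patterns : List (String × List String)) (out : (List (String × List String)) × List String) : Prop := out = split_domains_alt domains patterns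
instance (domains : List String) (patterns : List (String × List String)) (out : (List (String × List String)) × List String) : Decidable (Spec_split_domains domains patterns out) := by unfold Spec_split_domains; infer_instance

-- ===== CLAIM (what is proved, stated in full; the proofs are below) =====
def Claim_equal_split_domains : Prop := ∀ (domains : List String) (patterns : List (String × List String)), Dom_split_domains domains patterns → Spec_split_domains domains patterns (split_domains domains patterns)

-- ===== LEMMAS AND PROOFS =====

-- proof-only helpers: the two independent components of A's per-domain step
def stepRh (patterns : List (String × List String))
    (r : PySem.Dict String (PySem.Set String)) (d : String) :
    PySem.Dict String (PySem.Set String) :=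
  match patterns.find? (matchesB d) with
  | some p => r.modify p.1 PySem.Set.empty (fun s => PySem.Set.add s d)
  | none => r

def stepOh (patterns : List (String × List String)) (o : PySem.Set String) (d : String) :
    PySem.Set String :=
  if (patterns.find? (matchesB d)).isSome then o else PySem.Set.add o d

-- the three tests of A collapse to the substring test
lemma condA_eq (d pat : String) : condA d pat = PySem.Str.isIn pat d := by
  cases h : PySem.Str.isIn pat d with
  | true =>
    unfold condA
    rw [h]
    simp
  | false =>
    have hni : ¬ pat.toList <:+: d.toList := by
      refine (PySem.Chars.isIn_eq_false_iff _ _).mp ?_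
      simpa using h
    have h1 : (d == pat) = false := by
      simp only [beq_eq_false_iff_ne]
      rintro rfl; exact hni (List.infix_refl _)
    have h2 : PySem.Str.endswith d ("." ++ pat) = false := by
      cases hc : PySem.Str.endswith d ("." ++ pat) with
      | false => rfl
      | true =>
        exfalso
        have hc' : PySem.Chars.endswith d.toList (("." ++ pat).toList) = true := by
          simpa using hc
        have hsuf := (PySem.Chars.endswith_iff _ _).mp hc'
        have htl : ("." ++ pat).toList = '.' :: pat.toList := by simp
        rw [htl] at hsuf
        exact hni ((List.suffix_cons '.' pat.toList).trans hsuf).isInfix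
    unfold condA
    rw [h1, h2, h]
    rfl

lemma loopPats_eq (d : String) (pats : List String) :
    loopPatsA d pats = pats.any (fun pat => PySem.Str.isIn pat d) := by
  induction pats with
  | nil => simp [loopPatsA]
  | cons pat rest ih =>
    rw [loopPatsA, condA_eq, List.any_cons]
    cases h : PySem.Str.isIn pat d with
    | true => simp
    | false => simp [ih]

lemma loopNames_eq (d : String) (r : PySem.Dict String (PySem.Set String))
    (ps : List (String × List String)) :
    loopNamesA d r ps
      = match ps.find? (matchesB d) with
        | some p => (r.modify p.1 PySem.Set.empty (fun s => PySem.Set.add s d), true)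
        | none => (r, false) := by
  induction ps with
  | nil => simp [loopNamesA]
  | cons p t ih =>
    rw [loopNamesA]
    have hp : loopPatsA d p.2 = matchesB d p := loopPats_eq d p.2
    rw [hp, List.find?_cons]
    cases hm : matchesB d p with
    | true => simp
    | false => simpa using ih

-- lookup in the classification dict built by B
lemma getD_foldl_insert_fun (g : String → Option String) (l : List String) :
    ∀ (r : PySem.Dict String (Option String)) (x : String),
      (l.foldl (fun r y => r.insert y (g y)) r).getD x none
        = if x ∈ l then g x else r.getD x none := by
  induction l with
  | nil => intro r x; simp
  | cons y t ih =>
    intro r x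
    simp only [List.foldl_cons, ih, List.mem_cons]
    by_cases hx : x ∈ t
    · simp [hx]
    · by_cases hxy : x = y
      · subst hxy; simp [hx]
      · simp [hx, hxy, PySem.Dict.getD_insert]

lemma cats_getD (domains : List String) (patterns : List (String × List String))
    (d : String) (hd : d ∈ domains) :
    (PySem.Dict.ofList (domains.map (fun y => (y, categoryB patterns y)))).getD d none
      = categoryB patterns d := by
  have h0 : (PySem.Dict.ofList (domains.map (fun y => (y, categoryB patterns y)))
        : PySem.Dict String (Option String))
      = domains.foldl (fun r y => r.insert y (categoryB patterns y)) PySem.Dict.empty := by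
    show (domains.map (fun y => (y, categoryB patterns y))).foldl
        (fun r q => r.insert q.1 q.2) PySem.Dict.empty = _
    rw [List.foldl_map]
  rw [h0, getD_foldl_insert_fun, if_pos hd]

lemma contains_foldl_insert (k : String) (ps : List (String × List String)) :
    ∀ (r : PySem.Dict String (PySem.Set String)),
      (ps.foldl (fun r p => r.insert p.1 PySem.Set.empty) r).contains k
        = (r.contains k || ps.any (fun p => p.1 == k)) := by
  induction ps with
  | nil => intro r; simp
  | cons p t ih =>
    intro r
    rw [List.foldl_cons, ih, PySem.Dict.contains_insert, List.any_cons]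
    by_cases hk : k = p.1
    · subst hk; simp
    · have e1 : (k == p.1) = false := by simp [hk]
      have e2 : (p.1 == k) = false := by simp [Ne.symm hk]
      rw [e1, e2]
      simp

lemma nodup_keys_foldl_insert_empty (ps : List (String × List String)) :
    ∀ (r : PySem.Dict String (PySem.Set String)), r.keys.Nodup →
      (ps.foldl (fun r p => r.insert p.1 PySem.Set.empty) r).keys.Nodup := by
  induction ps with
  | nil => intro r h; simpa using h
  | cons p t ih =>
    intro r h
    exact ih _ (PySem.Dict.nodup_keys_insert _ _ _ h)

lemma values_foldl_insert_empty (ps : List (String × List String)) :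
    ∀ (r : PySem.Dict String (PySem.Set String)),
      (∀ kv ∈ r.items, kv.2 = (PySem.Set.empty : PySem.Set String)) →
      ∀ kv ∈ (ps.foldl (fun r p => r.insert p.1 PySem.Set.empty) r).items,
        kv.2 = (PySem.Set.empty : PySem.Set String) := by
  induction ps with
  | nil => intro r h; simpa using h
  | cons p t ih =>
    intro r h
    refine ih _ ?_
    intro kv hkv
    rcases (PySem.Dict.mem_items_insert _ _ _ _).mp hkv with h1 | h2
    · rw [h1]
    · exact h kv h2.1

-- effect of A's per-domain dict updates: value-wise conditional adds, key structure kept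
lemma foldl_stepR_items (patterns : List (String × List String)) (ds : List String) :
    ∀ (r : PySem.Dict String (PySem.Set String)),
      r.keys.Nodup →
      (∀ d ∈ ds, ∀ p, patterns.find? (matchesB d) = some p → r.contains p.1 = true) →
      (ds.foldl (stepRh patterns) r).items
        = r.items.map (fun kv => (kv.1,
            ds.foldl (fun s d => if categoryB patterns d == some kv.1 then PySem.Set.add s d else s) kv.2)) := by
  induction ds with
  | nil => intro r _ _; simp
  | cons d t ih =>
    intro r hnd hcont
    simp only [List.foldl_cons]
    cases hfind : patterns.find? (matchesB d) with
    | none =>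
      have hcat : categoryB patterns d = none := by simp [categoryB, hfind]
      have hstep : stepRh patterns r d = r := by simp [stepRh, hfind]
      rw [hstep, ih r hnd (fun d' hd' => hcont d' (List.mem_cons_of_mem _ hd'))]
      refine List.map_congr_left (fun kv hkv => ?_)
      simp [hcat, beq_iff_eq]
    | some p =>
      have hc : r.contains p.1 = true := hcont d (List.mem_cons_self) p hfind
      have hcat : categoryB patterns d = some p.1 := by simp [categoryB, hfind]
      have hstep : stepRh patterns r d
          = r.insert p.1 (PySem.Set.add (r.getD p.1 PySem.Set.empty) d) := by
        have h1 : stepRh patterns r d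
            = r.modify p.1 PySem.Set.empty (fun s => PySem.Set.add s d) := by
          simp [stepRh, hfind]
        rw [h1]; rfl
      have hnd' : (r.insert p.1 (PySem.Set.add (r.getD p.1 PySem.Set.empty) d)).keys.Nodup :=
        PySem.Dict.nodup_keys_insert _ _ _ hnd
      have hcont' : ∀ d' ∈ t, ∀ q, patterns.find? (matchesB d') = some q →
          (r.insert p.1 (PySem.Set.add (r.getD p.1 PySem.Set.empty) d)).contains q.1 = true := by
        intro d' hd' q hq
        rw [PySem.Dict.contains_insert]
        simp [hcont d' (List.mem_cons_of_mem _ hd') q hq]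
      rw [hstep, ih _ hnd' hcont', PySem.Dict.items_insert_of_contains _ _ hc, List.map_map]
      refine List.map_congr_left (fun kv hkv => ?_)
      by_cases hk : kv.1 = p.1
      · have hmem : (p.1, kv.2) ∈ r.items := by rw [← hk]; exact hkv
        have hkv2 : r.getD p.1 ([] : PySem.Set String) = kv.2 :=
          PySem.Dict.getD_of_mem_items _ hmem hnd _
        simp [Function.comp, hk, hcat, beq_iff_eq, hkv2]
      · simp [Function.comp, hk, Ne.symm hk, hcat, beq_iff_eq]

-- B's per-name inserts run parallel to A's empty-set initialisation
lemma foldl_insert_pair (f : String → PySem.Set String) (ps : List (String × List String)) :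
    ∀ (r1 r2 : PySem.Dict String (PySem.Set String)),
      r2.items = r1.items.map (fun kv => (kv.1, f kv.1)) →
      (ps.foldl (fun r p => r.insert p.1 (f p.1)) r2).items
        = (ps.foldl (fun r p => r.insert p.1 PySem.Set.empty) r1).items.map
            (fun kv => (kv.1, f kv.1)) := by
  induction ps with
  | nil => intro r1 r2 h; simpa using h
  | cons p t ih =>
    intro r1 r2 h
    simp only [List.foldl_cons]
    refine ih _ _ ?_
    have hkeys : r2.contains p.1 = r1.contains p.1 := by
      rw [PySem.Dict.contains_eq_decide_mem_keys, PySem.Dict.contains_eq_decide_mem_keys]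
      have hk : r2.keys = r1.keys := by
        simp only [PySem.Dict.keys, h, List.map_map]
        rfl
      rw [hk]
    by_cases hc : r1.contains p.1 = true
    · have hc2 : r2.contains p.1 = true := by rw [hkeys]; exact hc
      rw [PySem.Dict.items_insert_of_contains _ _ hc2,
          PySem.Dict.items_insert_of_contains _ _ hc, h, List.map_map, List.map_map]
      refine List.map_congr_left (fun kv hkv => ?_)
      by_cases hk : kv.1 = p.1 <;> simp [Function.comp, beq_iff_eq, hk]
    · have hc1 : r1.contains p.1 = false := by simpa using hc
      have hc2 : r2.contains p.1 = false := by rw [hkeys]; exact hc1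
      rw [PySem.Dict.items_insert_of_not_contains _ _ hc2,
          PySem.Dict.items_insert_of_not_contains _ _ hc1, h, List.map_append]
      simp

-- a conditional-add loop over domains is the set of the filtered list
lemma foldl_add_if (p : String → Bool) (l : List String) :
    l.foldl (fun s d => if p d then PySem.Set.add s d else s) PySem.Set.empty
      = PySem.Set.ofList (l.filter p) := by
  rw [PySem.List.foldl_if_eq_foldl_filter, PySem.Set.ofList_eq_foldl]
  rfl

theorem split_domains_eq_alt (domains : List String) (patterns : List (String × List String)) :
    split_domains domains patterns = split_domains_alt domains patterns := by
  simp only [split_domains, split_domains_alt]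
  -- A's loop step decomposes into independent dict and others components
  have hstep : (fun (st : PySem.Dict String (PySem.Set String) × PySem.Set String) (d : String) =>
      match loopNamesA d st.1 patterns with
      | (r, matched) => if matched then (r, st.2) else (r, PySem.Set.add st.2 d))
      = (fun st d => (stepRh patterns st.1 d, stepOh patterns st.2 d)) := by
    funext st d
    rw [loopNames_eq]
    cases hf : patterns.find? (matchesB d) <;> simp [stepRh, stepOh, hf]
  rw [hstep, PySem.List.foldl_prod_mk (f := stepRh patterns) (g := stepOh patterns)]
  have hgetD : ∀ d ∈ domains,
      (PySem.Dict.ofList (domains.map (fun y => (y, categoryB patterns y)))).getD d none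
        = categoryB patterns d := cats_getD domains patterns
  simp only [Prod.mk.injEq]
  constructor
  · -- dict component
    have hnd0 : (patterns.foldl (fun (r : PySem.Dict String (PySem.Set String)) p =>
        r.insert p.1 PySem.Set.empty) PySem.Dict.empty).keys.Nodup :=
      nodup_keys_foldl_insert_empty patterns PySem.Dict.empty (by simp)
    have hcont0 : ∀ d ∈ domains, ∀ p, patterns.find? (matchesB d) = some p →
        (patterns.foldl (fun (r : PySem.Dict String (PySem.Set String)) p =>
          r.insert p.1 PySem.Set.empty) PySem.Dict.empty).contains p.1 = true := by
      intro d _ p hp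
      rw [contains_foldl_insert]
      have hany : patterns.any (fun q => q.1 == p.1) = true := by
        simp only [List.any_eq_true]
        exact ⟨p, List.mem_of_find?_eq_some hp, by simp⟩
      simp [hany]
    rw [foldl_stepR_items patterns domains _ hnd0 hcont0]
    have hB : (PySem.Dict.ofList (patterns.map (fun p =>
          (p.1, PySem.Set.ofList (domains.filter (fun d =>
            (PySem.Dict.ofList (domains.map (fun y => (y, categoryB patterns y)))).getD d none
              == some p.1)))))).items
        = (patterns.foldl (fun (r : PySem.Dict String (PySem.Set String)) p =>
            r.insert p.1 PySem.Set.empty) PySem.Dict.empty).items.map (fun kv => (kv.1,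
              PySem.Set.ofList (domains.filter (fun d =>
                (PySem.Dict.ofList (domains.map (fun y => (y, categoryB patterns y)))).getD d none
                  == some kv.1)))) := by
      have h0 : (PySem.Dict.ofList (patterns.map (fun p =>
            (p.1, PySem.Set.ofList (domains.filter (fun d =>
              (PySem.Dict.ofList (domains.map (fun y => (y, categoryB patterns y)))).getD d none
                == some p.1))))) : PySem.Dict String (PySem.Set String))
          = patterns.foldl (fun r p => r.insert p.1
              (PySem.Set.ofList (domains.filter (fun d =>
                (PySem.Dict.ofList (domains.map (fun y => (y, categoryB patterns y)))).getD d none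
                  == some p.1)))) PySem.Dict.empty := by
        have hof : ∀ (l : List (String × PySem.Set String)),
            (PySem.Dict.ofList l : PySem.Dict String (PySem.Set String))
              = l.foldl (fun r q => r.insert q.1 q.2) PySem.Dict.empty := fun _ => rfl
        rw [hof, List.foldl_map]
      rw [h0]
      exact foldl_insert_pair (fun k => PySem.Set.ofList (domains.filter (fun d =>
          (PySem.Dict.ofList (domains.map (fun y => (y, categoryB patterns y)))).getD d none
            == some k)))
        patterns PySem.Dict.empty PySem.Dict.empty rfl
    rw [hB]
    refine List.map_congr_left (fun kv hkv => ?_)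
    have hkv2 : kv.2 = (PySem.Set.empty : PySem.Set String) :=
      values_foldl_insert_empty patterns PySem.Dict.empty
        (by intro kv h; exact (List.not_mem_nil h).elim) kv hkv
    have hfil : domains.filter (fun d => categoryB patterns d == some kv.1)
        = domains.filter (fun d =>
            (PySem.Dict.ofList (domains.map (fun y => (y, categoryB patterns y)))).getD d none
              == some kv.1) :=
      List.filter_congr (fun d hd => by rw [hgetD d hd])
    rw [hkv2, foldl_add_if, hfil]
  · -- others component
    have h1 : domains.foldl (stepOh patterns) PySem.Set.empty
        = domains.foldl (fun o d => if !(patterns.find? (matchesB d)).isSome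
            then PySem.Set.add o d else o) PySem.Set.empty := by
      refine PySem.List.foldl_congr_mem _ _ _ _ (fun o d _ => ?_)
      unfold stepOh
      cases (patterns.find? (matchesB d)).isSome <;> simp
    have hfil : domains.filter (fun d => !(patterns.find? (matchesB d)).isSome)
        = domains.filter (fun d =>
            ((PySem.Dict.ofList (domains.map (fun y => (y, categoryB patterns y)))).getD d none).isNone) := by
      refine List.filter_congr (fun d hd => ?_)
      rw [hgetD d hd]
      cases hf : patterns.find? (matchesB d) <;> simp [categoryB, hf]
    rw [h1, foldl_add_if, hfil]

-- ===== VERDICT (by name: the statement is the Claim_ definition above) =====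
theorem split_domains_spec : Claim_equal_split_domains := by
  intro domains patterns _
  unfold Spec_split_domains
  exact split_domains_eq_alt domains patterns
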